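-- pv_equiv track=rewrite | github.com/makoantz/battleshipsim | backend/app/algorithms/p2m2_optimized.py | _has_alternating_hit_pattern
-- ===== SOURCE A (Python) =====
-- from typing import List, Tuple, Set
--
-- def _has_alternating_hit_pattern(group: Set[Tuple[int, int]]) -> bool:
--     """Check if group has alternating hits like (x,y) and (x+2,y) or (x,y+2)."""
--     if len(group) < 2:
--         return False
--
--     group_list = list(group)
--     for i in range(len(group_list)):
--         for j in range(i + 1, len(group_list)):
--             r1, c1 = group_list[i]
--             r2, c2 = group_list[j]
--             # Check if hits are exactly 2 spaces apart horizontally or vertically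
--             if (abs(r1 - r2) == 2 and c1 == c2) or (abs(c1 - c2) == 2 and r1 == r2):
--                 return True
--     return False
-- ===== SOURCE B (Python) =====
-- def _has_alternating_hit_pattern(group):
--     """Single pass with a hash set: for each hit, probe its four cells two
--     away; a match means a previously seen hit is exactly 2 apart."""
--     seen = set()
--     for r, c in group:
--         if ((r + 2, c) in seen or (r - 2, c) in seen
--                 or (r, c + 2) in seen or (r, c - 2) in seen):
--             return True
--         seen.add((r, c))
--     return False
-- ===== Notes on version B (the rewrite author's own statement) =====
-- stated objective: faster
-- what changed: Replaces the all-pairs double loop with a single pass that probes a hash set of already-seen cells at the four positions exactly 2 away.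
import Mathlib
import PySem

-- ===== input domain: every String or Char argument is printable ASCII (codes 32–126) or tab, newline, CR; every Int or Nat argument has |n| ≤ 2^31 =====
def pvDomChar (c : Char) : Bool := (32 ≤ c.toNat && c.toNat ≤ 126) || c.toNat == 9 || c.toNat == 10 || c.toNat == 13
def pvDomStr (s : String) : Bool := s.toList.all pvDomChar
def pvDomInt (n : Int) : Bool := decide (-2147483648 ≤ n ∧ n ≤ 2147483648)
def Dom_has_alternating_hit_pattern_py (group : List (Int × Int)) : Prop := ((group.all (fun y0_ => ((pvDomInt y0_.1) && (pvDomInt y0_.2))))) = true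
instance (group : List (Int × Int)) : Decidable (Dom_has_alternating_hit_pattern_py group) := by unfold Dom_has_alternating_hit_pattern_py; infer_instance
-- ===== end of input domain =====

-- B replaces A's all-pairs double loop by a single pass that probes a set of
-- already-seen cells at the four positions exactly two apart (objective: faster).

-- ===== PORT A =====
-- the inner condition of A's if
def pvNear2 (p q : Int × Int) : Bool :=
  ((p.1 - q.1).natAbs == 2 && p.2 == q.2) || ((p.2 - q.2).natAbs == 2 && p.1 == q.1)

-- A's 'for i … for j in range(i+1, …)' pair scan with early return
def pvPairScan : List (Int × Int) → Bool
  | [] => false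
  | p :: rest => rest.any (fun q => pvNear2 p q) || pvPairScan rest

def has_alternating_hit_pattern_py (group : List (Int × Int)) : Bool :=
  if group.length < 2 then false
  else pvPairScan group

-- ===== PORT B =====
-- B's single pass: probe the four neighbours two away in the seen-set, else add
def pvAltLoop : List (Int × Int) → PySem.Set (Int × Int) → Bool
  | [], _ => false
  | (r, c) :: rest, seen =>
    if PySem.Set.contains seen (r + 2, c) || PySem.Set.contains seen (r - 2, c)
        || PySem.Set.contains seen (r, c + 2) || PySem.Set.contains seen (r, c - 2)
    then true
    else pvAltLoop rest (PySem.Set.add seen (r, c))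

def has_alternating_hit_pattern_py_alt (group : List (Int × Int)) : Bool :=
  pvAltLoop group PySem.Set.empty

-- ===== PRECONDITION & SPEC =====
def Spec_has_alternating_hit_pattern_py (group : List (Int × Int)) (out : Bool) : Prop := out = has_alternating_hit_pattern_py_alt group
instance (group : List (Int × Int)) (out : Bool) : Decidable (Spec_has_alternating_hit_pattern_py group out) := by unfold Spec_has_alternating_hit_pattern_py; infer_instance

-- ===== CLAIM (what is proved, stated in full; the proofs are below) =====
def Claim_equal_has_alternating_hit_pattern_py : Prop := ∀ (group : List (Int × Int)), Dom_has_alternating_hit_pattern_py group → Spec_has_alternating_hit_pattern_py group (has_alternating_hit_pattern_py group)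

-- ===== LEMMAS AND PROOFS =====

theorem pvNear2_symm (p q : Int × Int) : pvNear2 p q = pvNear2 q p := by
  rw [Bool.eq_iff_iff]
  simp only [pvNear2, Bool.or_eq_true, Bool.and_eq_true, beq_iff_eq]
  omega

-- B's neighbour probe hits exactly the cells near2 to (r, c)
theorem pvNear2_iff (r c : Int) (q : Int × Int) :
    pvNear2 (r, c) q = true ↔
      q = (r + 2, c) ∨ q = (r - 2, c) ∨ q = (r, c + 2) ∨ q = (r, c - 2) := by
  obtain ⟨r2, c2⟩ := q
  simp only [pvNear2, Prod.mk.injEq, Bool.or_eq_true, Bool.and_eq_true, beq_iff_eq]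
  omega

-- the loop invariant of B: a hit against the seen-set or a pair further on
theorem pvAltLoop_iff (rest : List (Int × Int)) (seen : PySem.Set (Int × Int)) :
    pvAltLoop rest seen = true ↔
      (∃ p ∈ rest, ∃ q ∈ seen, pvNear2 p q = true) ∨ pvPairScan rest = true := by
  induction rest generalizing seen with
  | nil => simp [pvAltLoop, pvPairScan]
  | cons p rest ih =>
    obtain ⟨r, c⟩ := p
    simp only [pvAltLoop]
    split_ifs with h
    · simp only [true_iff]
      left
      refine ⟨(r, c), by simp, ?_⟩
      simp only [Bool.or_eq_true, PySem.Set.contains_iff] at h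
      rcases h with ((h | h) | h) | h <;>
        exact ⟨_, h, by rw [pvNear2_iff]; tauto⟩
    · rw [ih]
      simp only [Bool.or_eq_true, PySem.Set.contains_iff, not_or] at h
      simp only [pvPairScan, Bool.or_eq_true, List.any_eq_true, List.mem_cons,
        PySem.Set.mem_add]
      constructor
      · rintro (⟨x, hx, q, hq, hn⟩ | hrest)
        · rcases hq with hq | hq
          · exact Or.inl ⟨x, Or.inr hx, q, hq, hn⟩
          · subst hq
            exact Or.inr (Or.inl ⟨x, hx, by rw [pvNear2_symm]; exact hn⟩)
        · tauto
      · rintro (⟨x, hx | hx, q, hq, hn⟩ | (⟨x, hx, hn⟩ | hrest))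
        · subst hx
          exfalso
          rw [pvNear2_iff] at hn
          rcases hn with hn | hn | hn | hn <;> subst hn <;> tauto
        · exact Or.inl ⟨x, hx, q, Or.inl hq, hn⟩
        · exact Or.inl ⟨x, hx, (r, c), Or.inr rfl, by rw [pvNear2_symm]; exact hn⟩
        · tauto

-- short lists never scan true
theorem pvPairScan_short (group : List (Int × Int)) (h : group.length < 2) :
    pvPairScan group = false := by
  match group, h with
  | [], _ => rfl
  | [p], _ => simp [pvPairScan]

-- ===== VERDICT (by name: the statement is the Claim_ definition above) =====
theorem has_alternating_hit_pattern_py_spec : Claim_equal_has_alternating_hit_pattern_py := by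
  intro group _
  unfold Spec_has_alternating_hit_pattern_py
  have hB : has_alternating_hit_pattern_py_alt group = pvPairScan group := by
    rw [Bool.eq_iff_iff]
    have := pvAltLoop_iff group PySem.Set.empty
    simpa [has_alternating_hit_pattern_py_alt, PySem.Set.empty] using this
  unfold has_alternating_hit_pattern_py
  split_ifs with h
  · rw [hB, pvPairScan_short group h]
  · rw [hB]
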